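-- pv_equiv track=rewrite | github.com/arjun-mann/CodePath_LC | session4.py | organize_exhibition
-- ===== SOURCE A (Python) =====
-- from collections import Counter
--
-- def organize_exhibition(collection):
--     freqmap = Counter(collection)
--     gallary = [] #(2d list)
--     count = len(freqmap)
--     while count > 0:
--         row = []
--         for k, v in freqmap.items():
--             if v > 0: row.append(k)
--             freqmap[k] -= 1
--             if freqmap[k] == 0: count -= 1
--         gallary.append(row)
--     return gallary
-- ===== SOURCE B (Python) =====
-- from collections import Counter
--
-- def organize_exhibition(collection):
--     counts = Counter(collection)
--     maxf = max(counts.values(), default=0)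
--     rows = [[] for _ in range(maxf)]
--     for k, c in counts.items():
--         for row in rows[:c]:
--             row.append(k)
--     return rows
-- ===== Notes on version B (the rewrite author's own statement) =====
-- stated objective: faster
-- what changed: Instead of repeatedly sweeping the whole counter once per row while decrementing every count and tracking how many keys are exhausted, B preallocates one empty row per frequency level (maxfreq rows) and makes a single pass over the counter, appending each key to its first c rows; total work is proportional to input size plus output size rather than maxfreq times the number of distinct keys.
import Mathlib
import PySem

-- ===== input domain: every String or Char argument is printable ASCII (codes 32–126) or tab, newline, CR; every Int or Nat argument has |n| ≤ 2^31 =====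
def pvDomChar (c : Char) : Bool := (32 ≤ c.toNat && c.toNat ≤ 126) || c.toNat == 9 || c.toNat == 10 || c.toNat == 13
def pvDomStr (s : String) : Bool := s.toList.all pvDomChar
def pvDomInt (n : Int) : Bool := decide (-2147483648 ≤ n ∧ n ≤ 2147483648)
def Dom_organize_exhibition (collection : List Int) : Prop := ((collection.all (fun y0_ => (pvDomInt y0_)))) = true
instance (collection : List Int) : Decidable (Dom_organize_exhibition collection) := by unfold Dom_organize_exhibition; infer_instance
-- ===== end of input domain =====

-- B replaces A's repeated full sweeps over the counter (one sweep per row, decrementing every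
-- count) by preallocating one row per frequency level and a single pass appending each key to
-- its first c rows.  Equivalence of the return value is proved on all inputs.

-- ===== PORT A =====
-- one body of A's while-loop: fold over the items snapshot; only already-visited keys are
-- decremented, so folding over the initial items list is exact for Python's live .items() view
def aStep (st : List Int × PySem.Dict Int Int × Int) (p : Int × Int) :
    List Int × PySem.Dict Int Int × Int :=
  let row := if 0 < p.2 then st.1 ++ [p.1] else st.1
  let d := st.2.1.modify p.1 0 (· - 1)
  let count := if d.getD p.1 0 = 0 then st.2.2 - 1 else st.2.2
  (row, d, count)

-- A's while-loop; the fuel `collection.length` bounds the number of iterations (the loop runs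
-- max-frequency times, and every frequency is at most the list length), so it is never exhausted
def aLoop : Nat → PySem.Dict Int Int → Int → List (List Int) → List (List Int)
  | 0, _, _, g => g
  | fuel+1, d, count, g =>
    if 0 < count then
      let st := d.items.foldl aStep (([] : List Int), d, count)
      aLoop fuel st.2.1 st.2.2 (g ++ [st.1])
    else g

def organize_exhibition (collection : List Int) : List (List Int) :=
  let freqmap := PySem.Dict.counter collection
  aLoop collection.length freqmap (freqmap.size : Int) []

-- ===== PORT B =====
-- `for row in rows[:c]: row.append(k)` — append k to every row of index < c
def bStep (rows : List (List Int)) (p : Int × Int) : List (List Int) :=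
  rows.mapIdx (fun i r => if (i : Int) < p.2 then r ++ [p.1] else r)

def organize_exhibition_alt (collection : List Int) : List (List Int) :=
  let counts := PySem.Dict.counter collection
  let maxf := PySem.List.maxD counts.values (fun v => v) 0
  let rows := List.replicate maxf.toNat ([] : List Int)
  counts.items.foldl bStep rows

-- ===== PRECONDITION & SPEC =====
def Spec_organize_exhibition (collection : List Int) (out : List (List Int)) : Prop := out = organize_exhibition_alt collection
instance (collection : List Int) (out : List (List Int)) : Decidable (Spec_organize_exhibition collection out) := by unfold Spec_organize_exhibition; infer_instance

-- ===== CLAIM (what is proved, stated in full; the proofs are below) =====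
def Claim_equal_organize_exhibition : Prop := ∀ (collection : List Int), Dom_organize_exhibition collection → Spec_organize_exhibition collection (organize_exhibition collection)

-- ===== LEMMAS AND PROOFS =====

-- the item list with every count lowered by j (A's dict state after j sweeps)
def shiftL (L : List (Int × Int)) (j : Int) : List (Int × Int) := L.map (fun p => (p.1, p.2 - j))

-- keys whose count exceeds j, in order: row number j of the gallery
def rowAt (L : List (Int × Int)) (j : Int) : List Int :=
  (L.filter (fun p => decide (j < p.2))).map Prod.fst

-- number of keys whose count exceeds j (A's `count` variable before sweep j)
def cnt (L : List (Int × Int)) (j : Int) : Int :=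
  ((L.filter (fun p => decide (j < p.2))).length : Int)

def decAll (l : List (Int × Int)) (d : PySem.Dict Int Int) : PySem.Dict Int Int :=
  l.foldl (fun d p => d.modify p.1 0 (· - 1)) d

def specLoop : Nat → List (Int × Int) → Int → List (List Int)
  | 0, _, _ => []
  | fuel+1, L, j => if 0 < cnt L j then rowAt L j :: specLoop fuel L (j+1) else []

theorem dict_eq_mk {κ ν : Type} (d : PySem.Dict κ ν) : PySem.Dict.mk d.items = d := rfl

theorem aLoop_succ (fuel : Nat) (d : PySem.Dict Int Int) (count : Int) (g : List (List Int))
    (hc : 0 < count) :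
    aLoop (fuel+1) d count g =
      aLoop fuel (d.items.foldl aStep ([], d, count)).2.1 (d.items.foldl aStep ([], d, count)).2.2
        (g ++ [(d.items.foldl aStep ([], d, count)).1]) := by
  rw [aLoop, if_pos hc]

theorem inner_fold (l : List (Int × Int)) (d : PySem.Dict Int Int) (row : List Int) (count : Int)
    (hl : (l.map Prod.fst).Nodup) (hdk : d.keys.Nodup)
    (hmem : ∀ p ∈ l, p.1 ∈ d.keys) (hval : ∀ p ∈ l, d.getD p.1 0 = p.2) :
    l.foldl aStep (row, d, count) =
      (row ++ (l.filter (fun p => decide (0 < p.2))).map Prod.fst,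
       decAll l d,
       count - ((l.filter (fun p => decide (p.2 = 1))).length : Int)) := by
  induction l generalizing d row count with
  | nil => simp [decAll]
  | cons p t ih =>
    simp only [List.map_cons, List.nodup_cons] at hl
    have hpk : p.1 ∈ d.keys := hmem p (List.mem_cons_self)
    have hc : d.contains p.1 = true := (PySem.Dict.contains_iff_mem_keys _ _).mpr hpk
    have hvp : d.getD p.1 0 = p.2 := hval p (List.mem_cons_self)
    have hk' : (d.modify p.1 0 (· - 1)).keys = d.keys := by
      rw [PySem.Dict.keys_modify, PySem.Dict.keys_insert_of_contains _ _ hc]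
    have hgdp : (d.modify p.1 0 (· - 1)).getD p.1 0 = p.2 - 1 := by
      rw [PySem.Dict.getD_modify, if_pos rfl, hvp]
    have hstep : aStep (row, d, count) p =
        ((if 0 < p.2 then row ++ [p.1] else row), d.modify p.1 0 (· - 1),
         (if p.2 - 1 = 0 then count - 1 else count)) := by
      simp only [aStep, hgdp]
    have ihres := ih (d.modify p.1 0 (· - 1))
      (if 0 < p.2 then row ++ [p.1] else row) (if p.2 - 1 = 0 then count - 1 else count)
      hl.2 (hk' ▸ hdk)
      (by intro q hq; rw [hk']; exact hmem q (List.mem_cons_of_mem _ hq))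
      (by
        intro q hq
        have hne : q.1 ≠ p.1 := by
          intro h; exact hl.1 (h ▸ List.mem_map_of_mem hq)
        rw [PySem.Dict.getD_modify, if_neg hne]
        exact hval q (List.mem_cons_of_mem _ hq))
    rw [List.foldl_cons, hstep, ihres]
    refine Prod.ext ?_ (Prod.ext ?_ ?_)
    · by_cases h1 : 0 < p.2 <;>
        simp [h1, List.append_assoc]
    · simp [decAll]
    · by_cases h1 : p.2 = 1
      · rw [if_pos (by omega : p.2 - 1 = 0)]
        have hlen : (List.filter (fun p => decide (p.2 = 1)) (p :: t)).length
            = (List.filter (fun p => decide (p.2 = 1)) t).length + 1 := by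
          simp [h1]
        rw [hlen]
        push_cast
        ring
      · rw [if_neg (by omega : ¬ p.2 - 1 = 0)]
        have hlen : List.filter (fun p => decide (p.2 = 1)) (p :: t)
            = List.filter (fun p => decide (p.2 = 1)) t := by
          simp [h1]
        rw [hlen]

theorem items_decAll (l : List (Int × Int)) (d : PySem.Dict Int Int)
    (hl : (l.map Prod.fst).Nodup) (hdk : d.keys.Nodup) (hmem : ∀ p ∈ l, p.1 ∈ d.keys) :
    (decAll l d).items =
      d.items.map (fun q => if q.1 ∈ l.map Prod.fst then (q.1, q.2 - 1) else q) := by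
  induction l generalizing d with
  | nil => simp [decAll]
  | cons p t ih =>
    simp only [List.map_cons, List.nodup_cons] at hl
    have hpk : p.1 ∈ d.keys := hmem p (List.mem_cons_self)
    have hc : d.contains p.1 = true := (PySem.Dict.contains_iff_mem_keys _ _).mpr hpk
    have hk' : (d.modify p.1 0 (· - 1)).keys = d.keys := by
      rw [PySem.Dict.keys_modify, PySem.Dict.keys_insert_of_contains _ _ hc]
    have hstep : decAll (p :: t) d = decAll t (d.modify p.1 0 (· - 1)) := by
      simp [decAll]
    rw [hstep, ih (d.modify p.1 0 (· - 1)) hl.2 (hk' ▸ hdk)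
        (by intro q hq; rw [hk']; exact hmem q (List.mem_cons_of_mem _ hq))]
    have hitems : (d.modify p.1 0 (· - 1)).items =
        d.items.map (fun q => if (q.1 == p.1) = true then (p.1, d.getD p.1 0 - 1) else q) :=
      PySem.Dict.items_insert_of_contains d _ hc
    rw [hitems, List.map_map]
    apply List.map_congr_left
    intro q hq
    by_cases hqp : q.1 = p.1
    · have hdq : d.getD q.1 0 = q.2 := PySem.Dict.getD_of_mem_items d (by
        cases q; exact hq) hdk 0
      simp only [Function.comp_apply, beq_iff_eq, if_pos hqp]
      rw [List.map_cons, if_pos (List.mem_cons.mpr (Or.inl hqp)), ← hqp, hdq]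
      rw [if_neg (show q.1 ∉ List.map Prod.fst t from by rw [hqp]; exact hl.1)]
    · simp only [Function.comp_apply, beq_iff_eq, if_neg hqp]
      rw [List.map_cons]
      by_cases hm : q.1 ∈ t.map Prod.fst
      · rw [if_pos hm, if_pos (List.mem_cons.mpr (Or.inr hm))]
      · rw [if_neg hm, if_neg (by
          intro h
          rcases List.mem_cons.mp h with h' | h'
          · exact hqp h'
          · exact hm h')]

theorem filter_len_split (L : List (Int × Int)) (j : Int) :
    (L.filter (fun p => decide (j < p.2))).length
      = (L.filter (fun p => decide (j+1 < p.2))).length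
        + (L.filter (fun p => decide (p.2 = j+1))).length := by
  induction L with
  | nil => simp
  | cons p t ih =>
    by_cases h1 : j < p.2 <;> by_cases h2 : j + 1 < p.2 <;> by_cases h3 : p.2 = j + 1 <;>
      simp [h1, h2, h3, ih] <;> omega

theorem shift_filter_gt (L : List (Int × Int)) (j : Int) :
    (shiftL L j).filter (fun p => decide (0 < p.2))
      = (L.filter (fun p => decide (j < p.2))).map (fun p => (p.1, p.2 - j)) := by
  rw [shiftL, List.filter_map]
  simp only [Function.comp_def]
  congr 1
  apply List.filter_congr
  intro a _
  simp only [decide_eq_decide]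
  omega

theorem shift_filter_one (L : List (Int × Int)) (j : Int) :
    (shiftL L j).filter (fun p => decide (p.2 = 1))
      = (L.filter (fun p => decide (p.2 = j+1))).map (fun p => (p.1, p.2 - j)) := by
  rw [shiftL, List.filter_map]
  simp only [Function.comp_def]
  congr 1
  apply List.filter_congr
  intro a _
  simp only [decide_eq_decide]
  omega

theorem aLoop_spec (fuel : Nat) (L : List (Int × Int)) (hl : (L.map Prod.fst).Nodup) :
    ∀ (j : Int) (g : List (List Int)),
      aLoop fuel (PySem.Dict.mk (shiftL L j)) (cnt L j) g = g ++ specLoop fuel L j := by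
  induction fuel with
  | zero => intro j g; simp [aLoop, specLoop]
  | succ fuel ih =>
    intro j g
    by_cases hc : 0 < cnt L j
    · have hkeys : (PySem.Dict.mk (shiftL L j)).keys = L.map Prod.fst := by
        simp [PySem.Dict.keys, shiftL]
      have hfst : (shiftL L j).map Prod.fst = L.map Prod.fst := by simp [shiftL]
      have hnd : (PySem.Dict.mk (shiftL L j)).keys.Nodup := by rw [hkeys]; exact hl
      have hinner := inner_fold (shiftL L j) (PySem.Dict.mk (shiftL L j)) [] (cnt L j)
        (by rw [hfst]; exact hl) hnd
        (by intro p hp; exact PySem.Dict.mem_keys_of_mem_items _ hp)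
        (by intro p hp; exact PySem.Dict.getD_of_mem_items _ (by cases p; exact hp) hnd 0)
      have hrow : ((shiftL L j).filter (fun p => decide (0 < p.2))).map Prod.fst = rowAt L j := by
        rw [shift_filter_gt, List.map_map, rowAt]
        apply List.map_congr_left
        intro a _
        rfl
      have hdict : decAll (shiftL L j) (PySem.Dict.mk (shiftL L j))
          = PySem.Dict.mk (shiftL L (j+1)) := by
        rw [← dict_eq_mk (decAll (shiftL L j) (PySem.Dict.mk (shiftL L j)))]
        congr 1
        rw [items_decAll (shiftL L j) _ (by rw [hfst]; exact hl) hnd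
            (by intro p hp; exact PySem.Dict.mem_keys_of_mem_items _ hp)]
        have hall : ∀ q ∈ (PySem.Dict.mk (shiftL L j)).items,
            (if q.1 ∈ (shiftL L j).map Prod.fst then (q.1, q.2 - 1) else q) = (q.1, q.2 - 1) := by
          intro q hq
          rw [if_pos (List.mem_map_of_mem hq)]
        rw [List.map_congr_left hall]
        show (shiftL L j).map _ = _
        simp only [shiftL, List.map_map]
        apply List.map_congr_left
        intro p _
        simp only [Function.comp_apply]
        congr 1
        ring
      have hcount : cnt L j - (((shiftL L j).filter (fun p => decide (p.2 = 1))).length : Int)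
          = cnt L (j+1) := by
        rw [shift_filter_one, List.length_map]
        have := filter_len_split L j
        unfold cnt
        omega
      rw [aLoop_succ _ _ _ _ hc]
      rw [show (PySem.Dict.mk (shiftL L j)).items = shiftL L j from rfl]
      rw [hinner]
      simp only [hdict, hcount, hrow, List.nil_append]
      rw [ih (j+1) (g ++ [rowAt L j])]
      rw [specLoop, if_pos hc]
      simp
    · rw [specLoop, if_neg hc, aLoop, if_neg hc]
      simp

theorem bfold_length (l : List (Int × Int)) (rows : List (List Int)) :
    (l.foldl bStep rows).length = rows.length := by
  induction l generalizing rows with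
  | nil => rfl
  | cons p t ih => rw [List.foldl_cons, ih]; simp [bStep]

theorem bfold_getElem? (l : List (Int × Int)) (rows : List (List Int)) (i : Nat)
    (hi : i < rows.length) :
    (l.foldl bStep rows)[i]?
      = some (rows[i] ++ (l.filter (fun p => decide ((i : Int) < p.2))).map Prod.fst) := by
  induction l generalizing rows with
  | nil => simp [List.getElem?_eq_getElem hi]
  | cons p t ih =>
    have hi' : i < (bStep rows p).length := by simpa [bStep] using hi
    rw [List.foldl_cons, ih (bStep rows p) hi']
    have hb : (bStep rows p)[i]'hi'
        = if (i : Int) < p.2 then rows[i] ++ [p.1] else rows[i] := by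
      simp [bStep]
    rw [hb]
    by_cases h1 : (i : Int) < p.2 <;> simp [h1, List.append_assoc]

theorem specLoop_eq (L : List (Int × Int)) (M : Int)
    (hub : ∀ p ∈ L, p.2 ≤ M) (hat : L ≠ [] → ∃ p ∈ L, p.2 = M) (hM0 : L = [] → M = 0) :
    ∀ (fuel : Nat) (j : Int), 0 ≤ j → (M - j).toNat ≤ fuel →
      specLoop fuel L j
        = (List.range (M - j).toNat).map (fun (t : Nat) => rowAt L (j + (t : Int))) := by
  intro fuel
  induction fuel with
  | zero =>
    intro j _ hfu
    rw [show (M - j).toNat = 0 from by omega]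
    simp [specLoop]
  | succ fuel ih =>
    intro j hj hfu
    by_cases hjM : j < M
    · have hLne : L ≠ [] := by
        intro h
        have := hM0 h; omega
      obtain ⟨p, hp, hpv⟩ := hat hLne
      have hcpos : 0 < cnt L j := by
        have hmem : p ∈ L.filter (fun p => decide (j < p.2)) :=
          List.mem_filter.mpr ⟨hp, by simp; omega⟩
        have := List.length_pos_of_mem hmem
        unfold cnt
        omega
      have htn : (M - j).toNat = (M - (j+1)).toNat + 1 := by omega
      rw [specLoop, if_pos hcpos, htn, List.range_succ_eq_map]
      rw [List.map_cons, List.map_map]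
      congr 1
      · simp
      · rw [ih (j+1) (by omega) (by omega)]
        apply List.map_congr_left
        intro t _
        simp only [Function.comp_apply]
        congr 1
        push_cast
        ring
    · have hc0 : ¬ 0 < cnt L j := by
        have hnil : L.filter (fun p => decide (j < p.2)) = [] := by
          apply List.filter_eq_nil_iff.mpr
          intro p hp
          have := hub p hp
          simp; omega
        unfold cnt
        rw [hnil]
        simp
      rw [specLoop, if_neg hc0, show (M - j).toNat = 0 from by omega]
      simp

-- the fold computing Python's max over a nonempty list: its value is attained and is an upper bound
def maxStep (acc : Option Int) (x : Int) : Option Int :=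
  match acc with
  | none => some x
  | some m => if m < x then some x else some m

theorem foldl_maxStep_ext (f : Option Int → Int → Option Int)
    (h : ∀ a x, f a x = maxStep a x) :
    ∀ (xs : List Int) (a : Option Int), List.foldl f a xs = List.foldl maxStep a xs := by
  intro xs
  induction xs with
  | nil => intro a; rfl
  | cons x t ih => intro a; rw [List.foldl_cons, List.foldl_cons, h, ih]

theorem max?_eq_foldl (vs : List Int) :
    PySem.List.max? vs (fun v => v) = vs.foldl maxStep none := by
  rw [PySem.List.max?]
  exact foldl_maxStep_ext _ (by intro a x; cases a <;> rfl) vs none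

theorem max_fold_spec (t : List Int) (a : Int) :
    ∃ m, List.foldl maxStep (some a) t = some m
      ∧ (m = a ∨ m ∈ t) ∧ a ≤ m ∧ ∀ y ∈ t, y ≤ m := by
  induction t generalizing a with
  | nil => exact ⟨a, rfl, Or.inl rfl, le_refl a, by simp⟩
  | cons x t ih =>
    by_cases h : a < x
    · obtain ⟨m, hm, hmem, hle, hub⟩ := ih x
      refine ⟨m, by simpa [maxStep, h] using hm, ?_, by omega, ?_⟩
      · rcases hmem with h' | h' <;> simp [h']
      · intro y hy
        rcases List.mem_cons.mp hy with h' | h'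
        · omega
        · exact hub y h'
    · obtain ⟨m, hm, hmem, hle, hub⟩ := ih a
      refine ⟨m, by simpa [maxStep, h] using hm, ?_, hle, ?_⟩
      · rcases hmem with h' | h' <;> simp [h']
      · intro y hy
        rcases List.mem_cons.mp hy with h' | h'
        · omega
        · exact hub y h'

-- ===== VERDICT (by name: the statement is the Claim_ definition above) =====
theorem organize_exhibition_spec : Claim_equal_organize_exhibition := by
  intro collection _
  unfold Spec_organize_exhibition
  set L := (PySem.Dict.counter collection).items with hL
  have hitems := PySem.Dict.items_counter collection
  have hnd : (L.map Prod.fst).Nodup := PySem.Dict.nodup_keys_counter collection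
  -- every stored count is ≥ 1 and ≤ the list length
  have hval : ∀ p ∈ L, 1 ≤ p.2 ∧ p.2 ≤ (collection.length : Int) := by
    intro p hp
    rw [hL, hitems] at hp
    obtain ⟨k, hk, rfl⟩ := List.mem_map.mp hp
    have hkmem : k ∈ collection := (PySem.Set.mem_ofList collection k).mp hk
    have h1 : 0 < collection.count k := List.count_pos_iff.mpr hkmem
    have h2 : collection.count k ≤ collection.length := List.count_le_length
    refine ⟨?_, ?_⟩
    · show (1 : Int) ≤ ((collection.count k : Nat) : Int)
      exact_mod_cast h1
    · show ((collection.count k : Nat) : Int) ≤ ((collection.length : Nat) : Int)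
      exact_mod_cast h2
  -- the maximum frequency M
  set M := PySem.List.maxD (PySem.Dict.counter collection).values (fun v => v) 0 with hM
  have hvalues : (PySem.Dict.counter collection).values = L.map Prod.snd := rfl
  have hMspec : (∀ p ∈ L, p.2 ≤ M) ∧ (L ≠ [] → ∃ p ∈ L, p.2 = M) ∧ (L = [] → M = 0) := by
    match hcase : L with
    | [] =>
      refine ⟨by simp, by simp, fun _ => ?_⟩
      rw [hM, PySem.List.maxD, hvalues]
      rfl
    | q :: t =>
      obtain ⟨m, hm, hmem, hle, hub⟩ := max_fold_spec (t.map Prod.snd) q.2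
      have hmax : PySem.List.max? ((q :: t).map Prod.snd) (fun v => v) = some m := by
        rw [max?_eq_foldl, List.map_cons, List.foldl_cons]
        rw [show maxStep none q.2 = some q.2 from rfl]
        exact hm
      have hMm : M = m := by
        rw [hM, PySem.List.maxD, hvalues, hmax, Option.getD_some]
      refine ⟨?_, fun _ => ?_, by simp⟩
      · intro p hp
        rcases List.mem_cons.mp hp with h' | h'
        · rw [hMm, h']; exact hle
        · rw [hMm]; exact hub p.2 (List.mem_map_of_mem h')
      · rcases hmem with h' | h'
        · exact ⟨q, List.mem_cons_self, by omega⟩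
        · obtain ⟨p, hp, hpv⟩ := List.mem_map.mp h'
          exact ⟨p, List.mem_cons_of_mem _ hp, by omega⟩
  have hMle : (M - 0).toNat ≤ collection.length := by
    by_cases hcase : L = []
    · have := hMspec.2.2 hcase; omega
    · obtain ⟨p, hp, hpv⟩ := hMspec.2.1 hcase
      have := (hval p hp).2
      omega
  -- A's side
  have hshift0 : shiftL L 0 = L := by simp [shiftL]
  have hdict0 : PySem.Dict.counter collection = PySem.Dict.mk (shiftL L 0) := by
    rw [hshift0, hL, dict_eq_mk]
  have hcnt0 : ((PySem.Dict.counter collection).size : Int) = cnt L 0 := by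
    have hfl : L.filter (fun p => decide ((0:Int) < p.2)) = L := by
      apply List.filter_eq_self.mpr
      intro p hp
      have := (hval p hp).1
      simp
      omega
    unfold cnt
    rw [hfl]
    rfl
  have hA : organize_exhibition collection = specLoop collection.length L 0 := by
    show aLoop collection.length (PySem.Dict.counter collection)
        ((PySem.Dict.counter collection).size : Int) [] = specLoop collection.length L 0
    rw [hcnt0]
    conv_lhs => rw [hdict0]
    rw [aLoop_spec collection.length L hnd 0 []]
    simp
  -- B's side
  have hB : organize_exhibition_alt collection
      = (List.range M.toNat).map (fun (t : Nat) => rowAt L ((t : Int))) := by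
    show List.foldl bStep
        (List.replicate (PySem.List.maxD (PySem.Dict.counter collection).values
          (fun v => v) 0).toNat []) (PySem.Dict.counter collection).items
      = (List.range M.toNat).map (fun (t : Nat) => rowAt L ((t : Int)))
    rw [← hM, ← hL]
    apply List.ext_getElem?
    intro i
    by_cases hi : i < M.toNat
    · have hi' : i < (List.replicate M.toNat ([] : List Int)).length := by simpa using hi
      rw [bfold_getElem? L _ i hi']
      rw [List.getElem?_map, List.getElem?_range hi]
      rw [List.getElem_replicate]
      simp [rowAt]
    · have h1 : (List.foldl bStep (List.replicate M.toNat []) L)[i]? = none := by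
        apply List.getElem?_eq_none
        rw [bfold_length]
        simpa using (by omega : M.toNat ≤ i)
      have h2 : ((List.range M.toNat).map (fun (t : Nat) => rowAt L ((t : Int))))[i]? = none := by
        apply List.getElem?_eq_none
        simpa using (by omega : M.toNat ≤ i)
      rw [h1, h2]
  rw [hA, hB]
  rw [specLoop_eq L M hMspec.1 hMspec.2.1 hMspec.2.2 collection.length 0 (by omega) (by omega)]
  rw [show M - 0 = M from by ring]
  apply List.map_congr_left
  intro t _
  congr 1
  omega
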